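-- pv_equiv track=rewrite | github.com/cheng-jiru/- | week10/制作菜肴时间较长.py | top_left_max
-- ===== SOURCE A (Python) =====
-- def top_left_max(matrix,rows,cols):
--     top_lest_max_matrix = [[0 for i in range(cols)] for j in range(rows)]
--     for i in range(1,rows-1):
--         for j in range(1,cols-1):
--             if i==1:
--                 top_lest_max_matrix[i][j] = max(top_lest_max_matrix[i][j-1],matrix[i-1][j-1])
--             elif j==1:
--                 top_lest_max_matrix[i][j] = max(top_lest_max_matrix[i-1][j],matrix[i-1][j-1])
--             else:
--                 top_lest_max_matrix[i][j] = max(top_lest_max_matrix[i-1][j],top_lest_max_matrix[i][j-1],matrix[i-1][j-1])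
--     return top_lest_max_matrix
-- ===== SOURCE B (Python) =====
-- def top_left_max(matrix, rows, cols):
--     h = rows - 2
--     w = cols - 2
--     if h <= 0 or w <= 0:
--         return [[0] * cols for _ in range(rows)]
--     # pass 1: row-wise running maxima of the top-left h x w block of matrix
--     rowmax = []
--     for a in range(h):
--         run = matrix[a][0]
--         acc = []
--         for b in range(w):
--             v = matrix[a][b]
--             if v > run:
--                 run = v
--             acc.append(run)
--         rowmax.append(acc)
--     # pass 2: column-wise running max, floored at 0 by the zero start
--     inner = []
--     col = [0] * w
--     for r in rowmax:
--         col = [c if c > v else v for c, v in zip(col, r)]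
--         inner.append(col)
--     # assemble: a zero border around the inner block
--     zero = [0] * cols
--     return [list(zero)] + [[0] + r + [0] for r in inner] + [list(zero)]
-- ===== Notes on version B (the rewrite author's own statement) =====
-- stated objective: alternative
-- what changed: Replaces A's in-place 3-way-max DP over a preallocated full table (with special-cased first row/column branches) by two separate passes over the compact (rows-2)x(cols-2) block -- a row-wise running-max pass, then a column-wise running-max pass floored at 0 -- and assembles the zero border afterwards.
import Mathlib
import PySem

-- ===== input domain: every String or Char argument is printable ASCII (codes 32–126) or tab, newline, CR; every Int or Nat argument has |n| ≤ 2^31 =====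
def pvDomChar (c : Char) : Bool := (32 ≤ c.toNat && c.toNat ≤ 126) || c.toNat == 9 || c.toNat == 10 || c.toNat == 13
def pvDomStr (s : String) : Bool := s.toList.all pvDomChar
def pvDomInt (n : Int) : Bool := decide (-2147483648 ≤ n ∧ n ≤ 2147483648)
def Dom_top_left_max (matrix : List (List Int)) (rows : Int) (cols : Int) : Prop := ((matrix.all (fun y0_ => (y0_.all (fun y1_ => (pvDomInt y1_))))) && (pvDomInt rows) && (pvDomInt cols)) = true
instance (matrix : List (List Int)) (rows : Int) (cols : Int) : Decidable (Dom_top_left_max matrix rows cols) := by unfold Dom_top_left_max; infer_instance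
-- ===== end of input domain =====

-- B replaces A's in-place three-way-max DP over a preallocated full table by two separate
-- running-max passes (row-wise, then column-wise floored at 0) over the inner block, with the
-- zero border assembled afterwards (objective: alternative decomposition, same complexity).

-- ===== PORT A =====
def top_left_max (matrix : List (List Int)) (rows : Int) (cols : Int) : List (List Int) :=
  -- top_lest_max_matrix = [[0 for i in range(cols)] for j in range(rows)]
  let init : List (List Int) :=
    (PySem.List.pyRange 0 rows 1).map (fun _ => (PySem.List.pyRange 0 cols 1).map (fun _ => (0 : Int)))
  -- the two nested loops; 'none' marks the point where Python raises IndexError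
  let res : Option (List (List Int)) :=
    (PySem.List.pyRange 1 (rows - 1) 1).foldl (fun st i =>
      (PySem.List.pyRange 1 (cols - 1) 1).foldl (fun st j =>
        st.bind (fun t =>
          (PySem.List.pyGet? matrix (i - 1)).bind (fun mrow =>
            (PySem.List.pyGet? mrow (j - 1)).map (fun mv =>
              let ti := i.toNat   -- loop indices are nonnegative, so plain list indexing
              let tj := j.toNat
              let v : Int :=
                if i == 1 then max ((t.getD ti []).getD (tj - 1) 0) mv
                else if j == 1 then max ((t.getD (ti - 1) []).getD tj 0) mv
                else max (max ((t.getD (ti - 1) []).getD tj 0) ((t.getD ti []).getD (tj - 1) 0)) mv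
              t.set ti ((t.getD ti []).set tj v))))) st) (some init)
  res.getD []

-- ===== PORT B =====
def top_left_max_alt (matrix : List (List Int)) (rows : Int) (cols : Int) : List (List Int) :=
  let h := rows - 2
  let w := cols - 2
  if h ≤ 0 ∨ w ≤ 0 then
    (PySem.List.pyRange 0 rows 1).map (fun _ => (PySem.List.pyRange 0 cols 1).map (fun _ => (0 : Int)))
  else
    -- pass 1: row-wise running maxima of the top-left h x w block ('none' = IndexError)
    let rowmax : Option (List (List Int)) :=
      (PySem.List.pyRange 0 h 1).foldl (fun st a =>
        st.bind (fun rm =>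
          (PySem.List.pyGet? matrix a).bind (fun mrow =>
            (PySem.List.pyGet? mrow 0).bind (fun r0 =>
              ((PySem.List.pyRange 0 w 1).foldl (fun st2 b =>
                  st2.bind (fun p =>
                    (PySem.List.pyGet? mrow b).map (fun v =>
                      let run := if v > p.1 then v else p.1
                      (run, p.2 ++ [run]))))
                (some ((r0 : Int), ([] : List Int)))).map (fun p => rm ++ [p.2]))))) (some [])
    match rowmax with
    | none => []   -- Python raises here; such inputs are outside Pre_
    | some rm =>
      -- pass 2: column-wise running max, floored at 0 by the zero start
      let step : List Int × List (List Int) :=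
        rm.foldl (fun st r =>
            let col := (st.1.zip r).map (fun cv => if cv.1 > cv.2 then cv.1 else cv.2)
            (col, st.2 ++ [col]))
          ((PySem.List.pyRange 0 w 1).map (fun _ => (0 : Int)), [])
      -- assemble: a zero border around the inner block
      let zero : List Int := (PySem.List.pyRange 0 cols 1).map (fun _ => (0 : Int))
      [zero] ++ step.2.map (fun r => [(0 : Int)] ++ r ++ [0]) ++ [zero]

-- ===== PRECONDITION & SPEC =====
-- Pre_ excludes exactly the inputs where A raises IndexError: rows > 2 and cols > 2 while the
-- matrix lacks some entry of the scanned (rows-2) x (cols-2) top-left block.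
def Pre_top_left_max (matrix : List (List Int)) (rows : Int) (cols : Int) : Prop :=
  rows ≤ 2 ∨ cols ≤ 2 ∨
    ((rows - 2).toNat ≤ matrix.length ∧
      ∀ r ∈ matrix.take (rows - 2).toNat, (cols - 2).toNat ≤ r.length)
instance (matrix : List (List Int)) (rows : Int) (cols : Int) : Decidable (Pre_top_left_max matrix rows cols) := by unfold Pre_top_left_max; infer_instance

def pvWitness_top_left_max : List (List Int) × Int × Int := ([[5, -3], [2, 7]], 4, 4)

def Spec_top_left_max (matrix : List (List Int)) (rows : Int) (cols : Int) (out : List (List Int)) : Prop := out = top_left_max_alt matrix rows cols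
instance (matrix : List (List Int)) (rows : Int) (cols : Int) (out : List (List Int)) : Decidable (Spec_top_left_max matrix rows cols out) := by unfold Spec_top_left_max; infer_instance

-- ===== CLAIM (what is proved, stated in full; the proofs are below) =====
def Claim_equal_top_left_max : Prop := ∀ (matrix : List (List Int)) (rows : Int) (cols : Int), Dom_top_left_max matrix rows cols → Pre_top_left_max matrix rows cols → Spec_top_left_max matrix rows cols (top_left_max matrix rows cols)


-- ===== LEMMAS AND PROOFS =====

-- matrix entry as a total function (all accesses the claim uses are in range under Pre_)
def pvM (matrix : List (List Int)) (a b : Nat) : Int := (matrix.getD a []).getD b 0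

-- running max of row a over columns 0..j-1, threaded from an initial accumulator
def pvRscan (m : Nat → Nat → Int) (a : Nat) (x : Int) : Nat → Int
  | 0 => x
  | j + 1 => max (pvRscan m a x j) (m a j)

-- the common value: max(0, prefix max of the i x j top-left rectangle)
def pvR (m : Nat → Nat → Int) : Nat → Nat → Int
  | 0, _ => 0
  | i + 1, j => pvRscan m i (pvR m i j) j

-- plain running maximum of row a over columns 0..b (B's pass-1 value)
def pvRowM (m : Nat → Nat → Int) (a : Nat) : Nat → Int
  | 0 => m a 0
  | b + 1 => if m a (b + 1) > pvRowM m a b then m a (b + 1) else pvRowM m a b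

def pvMkT (rn cn : Nat) (f : Nat → Nat → Int) : List (List Int) :=
  (List.range rn).map (fun i => (List.range cn).map (f i))

-- A's partial table: rows 1..k done, and in row k+1 the first l interior cells done
def pvF (m : Nat → Nat → Int) (w k l : Nat) (i j : Nat) : Int :=
  if 1 ≤ i ∧ 1 ≤ j ∧ j ≤ w ∧ (i ≤ k ∨ (i = k + 1 ∧ j ≤ l)) then pvR m i j else 0

-- the finished table contents
def pvFin (m : Nat → Nat → Int) (h w : Nat) (i j : Nat) : Int :=
  if 1 ≤ i ∧ i ≤ h ∧ 1 ≤ j ∧ j ≤ w then pvR m i j else 0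

theorem pvRscan_max (m : Nat → Nat → Int) (a : Nat) (x y : Int) (j : Nat) :
    pvRscan m a (max x y) j = max x (pvRscan m a y j) := by
  induction j with
  | zero => rfl
  | succ j ih => simp [pvRscan, ih, max_assoc]

theorem le_pvRscan (m : Nat → Nat → Int) (a : Nat) (x : Int) (j : Nat) :
    x ≤ pvRscan m a x j := by
  induction j with
  | zero => exact le_rfl
  | succ j ih => exact le_trans ih (le_max_left _ _)

theorem pvRscan_mono (m : Nat → Nat → Int) (a : Nat) {x y : Int} (hxy : x ≤ y) (j : Nat) :
    pvRscan m a x j ≤ pvRscan m a y j := by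
  induction j with
  | zero => exact hxy
  | succ j ih => exact max_le_max ih le_rfl

theorem pvR_nonneg (m : Nat → Nat → Int) (i j : Nat) : 0 ≤ pvR m i j := by
  induction i with
  | zero => simp [pvR]
  | succ i ih => exact le_trans ih (le_pvRscan _ _ _ _)

theorem pvR_zero_right (m : Nat → Nat → Int) (i : Nat) : pvR m i 0 = 0 := by
  induction i with
  | zero => rfl
  | succ i ih => simpa [pvR, pvRscan] using ih

theorem pvR_mono (m : Nat → Nat → Int) (i j : Nat) : pvR m i j ≤ pvR m i (j + 1) := by
  induction i with
  | zero => simp [pvR]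
  | succ i ih =>
      calc pvR m (i + 1) j = pvRscan m i (pvR m i j) j := rfl
        _ ≤ pvRscan m i (pvR m i (j + 1)) j := pvRscan_mono m i ih j
        _ ≤ max (pvRscan m i (pvR m i (j + 1)) j) (m i j) := le_max_left _ _
        _ = pvR m (i + 1) (j + 1) := rfl

theorem pvRscan_eq_max_rowM (m : Nat → Nat → Int) (a : Nat) (x : Int) (b : Nat) :
    pvRscan m a x (b + 1) = max x (pvRowM m a b) := by
  induction b with
  | zero => simp [pvRscan, pvRowM]
  | succ b ih =>
      have hr : pvRowM m a (b + 1) = max (pvRowM m a b) (m a (b + 1)) := by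
        simp [pvRowM, max_def]; split_ifs <;> omega
      calc pvRscan m a x (b + 2) = max (pvRscan m a x (b + 1)) (m a (b + 1)) := rfl
        _ = max (max x (pvRowM m a b)) (m a (b + 1)) := by rw [ih]
        _ = max x (pvRowM m a (b + 1)) := by rw [hr, max_assoc]

theorem pvR_succ_left (m : Nat → Nat → Int) (i b : Nat) :
    pvR m (i + 1) (b + 1) = max (pvR m i (b + 1)) (pvRowM m i b) := by
  simpa [pvR] using pvRscan_eq_max_rowM m i (pvR m i (b + 1)) b

theorem pvR_succ_succ (m : Nat → Nat → Int) (i j : Nat) :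
    pvR m (i + 1) (j + 1) = max (max (pvR m i (j + 1)) (pvR m (i + 1) j)) (m i j) := by
  have h1 : pvR m (i + 1) (j + 1) = max (pvRscan m i (pvR m i (j + 1)) j) (m i j) := rfl
  have h2 : pvR m i (j + 1) = max (pvR m i (j + 1)) (pvR m i j) :=
    (max_eq_left (pvR_mono m i j)).symm
  rw [h1]
  congr 1
  calc pvRscan m i (pvR m i (j + 1)) j
      = pvRscan m i (max (pvR m i (j + 1)) (pvR m i j)) j := by rw [← h2]
    _ = max (pvR m i (j + 1)) (pvRscan m i (pvR m i j) j) := pvRscan_max m i _ _ j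
    _ = max (pvR m i (j + 1)) (pvR m (i + 1) j) := rfl

theorem pvMkT_congr (rn cn : Nat) (f g : Nat → Nat → Int)
    (hfg : ∀ i < rn, ∀ j < cn, f i j = g i j) : pvMkT rn cn f = pvMkT rn cn g := by
  unfold pvMkT
  refine List.map_congr_left (fun i hi => ?_)
  refine List.map_congr_left (fun j hj => ?_)
  exact hfg i (List.mem_range.mp hi) j (List.mem_range.mp hj)

theorem pvMkT_getD (rn cn : Nat) (f : Nat → Nat → Int) (i : Nat) (hi : i < rn) :
    (pvMkT rn cn f).getD i [] = (List.range cn).map (f i) := by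
  simp [pvMkT, List.getD, hi]

theorem getD_map_range_int (cn : Nat) (g : Nat → Int) (j : Nat) (hj : j < cn) :
    ((List.range cn).map g).getD j 0 = g j := by
  simp [List.getD, hj]

theorem pvMkT_set (rn cn : Nat) (f : Nat → Nat → Int) (i0 j0 : Nat) (v : Int)
    (hi : i0 < rn) (_hj : j0 < cn) :
    (pvMkT rn cn f).set i0 (((pvMkT rn cn f).getD i0 []).set j0 v)
      = pvMkT rn cn (fun i j => if i = i0 ∧ j = j0 then v else f i j) := by
  rw [pvMkT_getD rn cn f i0 hi]
  unfold pvMkT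
  apply List.ext_getElem
  · simp
  · intro n h1 h2
    by_cases hn : n = i0
    · subst hn
      simp only [List.getElem_set_self, List.getElem_map, List.getElem_range]
      apply List.ext_getElem
      · simp
      · intro q q1 q2
        simp only [List.getElem_set, List.getElem_map, List.getElem_range,
          true_and]
        split_ifs with hc1 hc2 hc3 <;> first | rfl | omega
    · have hn' : ¬ i0 = n := fun h => hn h.symm
      simp only [List.getElem_set, List.getElem_map, List.getElem_range, if_neg hn']
      refine List.map_congr_left (fun q hq => ?_)
      simp [hn]


-- the body of A's inner loop, named so the fold lemmas can speak about it
def pvStepA (matrix : List (List Int)) (st : Option (List (List Int))) (i j : Int) :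
    Option (List (List Int)) :=
  st.bind (fun t =>
    (PySem.List.pyGet? matrix (i - 1)).bind (fun mrow =>
      (PySem.List.pyGet? mrow (j - 1)).map (fun mv =>
        let ti := i.toNat
        let tj := j.toNat
        let v : Int :=
          if i == 1 then max ((t.getD ti []).getD (tj - 1) 0) mv
          else if j == 1 then max ((t.getD (ti - 1) []).getD tj 0) mv
          else max (max ((t.getD (ti - 1) []).getD tj 0) ((t.getD ti []).getD (tj - 1) 0)) mv
        t.set ti ((t.getD ti []).set tj v))))

theorem top_left_max_eq (matrix : List (List Int)) (rows cols : Int) :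
    top_left_max matrix rows cols =
      ((PySem.List.pyRange 1 (rows - 1) 1).foldl (fun st i =>
          (PySem.List.pyRange 1 (cols - 1) 1).foldl (fun st j => pvStepA matrix st i j) st)
        (some ((PySem.List.pyRange 0 rows 1).map
          (fun _ => (PySem.List.pyRange 0 cols 1).map (fun _ => (0 : Int)))))).getD [] := rfl

theorem pvStepA_eq (matrix : List (List Int)) (h w rn cn k l : Nat)
    (hlen : h ≤ matrix.length) (hrow : ∀ r ∈ matrix.take h, w ≤ r.length)
    (hrn : rn = h + 2) (hcn : cn = w + 2) (hk : k < h) (hl : l < w) :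
    pvStepA matrix (some (pvMkT rn cn (pvF (pvM matrix) w k l))) (1 + (k : Int)) (1 + (l : Int))
      = some (pvMkT rn cn (pvF (pvM matrix) w k (l + 1))) := by
  have hk' : k < matrix.length := lt_of_lt_of_le hk hlen
  have hmw : w ≤ matrix[k].length := by
    refine hrow _ ?_
    have : (matrix.take h)[k]'(by simp [hk', hk]) = matrix[k] := List.getElem_take
    exact this ▸ List.getElem_mem _
  have hl' : l < matrix[k].length := lt_of_lt_of_le hl hmw
  have e1 : (1 + (k : Int)) - 1 = (k : Int) := by ring
  have e2 : (1 + (l : Int)) - 1 = (l : Int) := by ring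
  have eti : (1 + (k : Int)).toNat = k + 1 := by omega
  have etj : (1 + (l : Int)).toNat = l + 1 := by omega
  have hm : pvM matrix k l = matrix[k][l] := by
    simp [pvM, List.getD, hk', hl']
  have hget1 : PySem.List.pyGet? matrix ((1 + (k : Int)) - 1) = some matrix[k] := by
    rw [e1, PySem.List.pyGet?_natCast, List.getElem?_eq_getElem hk']
  have hget2 : PySem.List.pyGet? matrix[k] ((1 + (l : Int)) - 1) = some matrix[k][l] := by
    rw [e2, PySem.List.pyGet?_natCast, List.getElem?_eq_getElem hl']
  unfold pvStepA
  rw [Option.bind_some, hget1, Option.bind_some, hget2, Option.map_some]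
  simp only [eti, etj]
  -- the three reads of the partial table
  have hread_left : ((pvMkT rn cn (pvF (pvM matrix) w k l)).getD (k + 1) []).getD (l + 1 - 1) 0
      = pvF (pvM matrix) w k l (k + 1) l := by
    rw [pvMkT_getD rn cn _ (k + 1) (by omega)]
    simpa using getD_map_range_int cn _ l (by omega)
  have hread_up : ((pvMkT rn cn (pvF (pvM matrix) w k l)).getD (k + 1 - 1) []).getD (l + 1) 0
      = pvF (pvM matrix) w k l k (l + 1) := by
    rw [show k + 1 - 1 = k from rfl, pvMkT_getD rn cn _ k (by omega)]
    exact getD_map_range_int cn _ (l + 1) (by omega)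
  -- the written value is always pvR (k+1) (l+1)
  have hFleft : pvF (pvM matrix) w k l (k + 1) l = pvR (pvM matrix) (k + 1) l := by
    unfold pvF
    rcases Nat.eq_zero_or_pos l with rfl | hlpos
    · rw [if_neg (by omega), pvR_zero_right]
    · rw [if_pos (by omega)]
  have hFup : pvF (pvM matrix) w k l k (l + 1) = pvR (pvM matrix) k (l + 1) := by
    unfold pvF
    rcases Nat.eq_zero_or_pos k with rfl | hkpos
    · rw [if_neg (by omega)]; simp [pvR]
    · rw [if_pos (by omega)]
  have hval : (if (1 + (k : Int)) == 1 then
        max (((pvMkT rn cn (pvF (pvM matrix) w k l)).getD (k + 1) []).getD (l + 1 - 1) 0) matrix[k][l]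
      else if (1 + (l : Int)) == 1 then
        max (((pvMkT rn cn (pvF (pvM matrix) w k l)).getD (k + 1 - 1) []).getD (l + 1) 0) matrix[k][l]
      else
        max (max (((pvMkT rn cn (pvF (pvM matrix) w k l)).getD (k + 1 - 1) []).getD (l + 1) 0)
          (((pvMkT rn cn (pvF (pvM matrix) w k l)).getD (k + 1) []).getD (l + 1 - 1) 0)) matrix[k][l])
      = pvR (pvM matrix) (k + 1) (l + 1) := by
    rw [pvR_succ_succ, hm]
    by_cases hk0 : k = 0
    · subst hk0
      rw [if_pos (by simp), hread_left, hFleft,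
        show pvR (pvM matrix) 0 (l + 1) = 0 from rfl,
        max_eq_right (pvR_nonneg _ _ _)]
    · rw [if_neg (by simp; omega)]
      by_cases hl0 : l = 0
      · subst hl0
        rw [if_pos (by simp), hread_up, hFup, pvR_zero_right]
        rw [max_eq_left (pvR_nonneg _ _ _)]
      · rw [if_neg (by simp; omega), hread_up, hread_left, hFup, hFleft]
  rw [hval, pvMkT_set rn cn _ (k + 1) (l + 1) _ (by omega) (by omega)]
  congr 1
  apply pvMkT_congr
  intro i hi j hj
  by_cases hij : i = k + 1 ∧ j = l + 1
  · obtain ⟨rfl, rfl⟩ := hij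
    rw [if_pos ⟨rfl, rfl⟩]
    unfold pvF
    rw [if_pos (by omega)]
  · rw [if_neg hij]
    unfold pvF
    split_ifs <;> first | rfl | omega


theorem pvInnerA (matrix : List (List Int)) (h w rn cn k : Nat)
    (hlen : h ≤ matrix.length) (hrow : ∀ r ∈ matrix.take h, w ≤ r.length)
    (hrn : rn = h + 2) (hcn : cn = w + 2) (hk : k < h) :
    ∀ l, l ≤ w →
      List.foldl (fun st (ln : Nat) => pvStepA matrix st (1 + (k : Int)) (1 + (ln : Int)))
          (some (pvMkT rn cn (pvF (pvM matrix) w k 0))) (List.range l)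
        = some (pvMkT rn cn (pvF (pvM matrix) w k l)) := by
  intro l
  induction l with
  | zero => intro _; rfl
  | succ l ih =>
      intro hl
      rw [List.range_succ, List.foldl_append, ih (by omega), List.foldl_cons, List.foldl_nil]
      exact pvStepA_eq matrix h w rn cn k l hlen hrow hrn hcn hk (by omega)

theorem pvOuterA (matrix : List (List Int)) (h w rn cn : Nat)
    (hlen : h ≤ matrix.length) (hrow : ∀ r ∈ matrix.take h, w ≤ r.length)
    (hrn : rn = h + 2) (hcn : cn = w + 2) :
    ∀ k, k ≤ h →
      List.foldl (fun st (kn : Nat) =>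
          List.foldl (fun st (ln : Nat) => pvStepA matrix st (1 + (kn : Int)) (1 + (ln : Int)))
            st (List.range w))
          (some (pvMkT rn cn (fun _ _ => 0))) (List.range k)
        = some (pvMkT rn cn (pvF (pvM matrix) w k 0)) := by
  intro k
  induction k with
  | zero =>
      intro _
      rw [List.range_zero, List.foldl_nil]
      congr 1
      apply pvMkT_congr
      intro i _ j _
      unfold pvF
      rw [if_neg (by omega)]
  | succ k ih =>
      intro hk
      rw [List.range_succ, List.foldl_append, ih (by omega), List.foldl_cons, List.foldl_nil]
      rw [pvInnerA matrix h w rn cn k hlen hrow hrn hcn (by omega) w le_rfl]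
      congr 1
      apply pvMkT_congr
      intro i _ j _
      unfold pvF
      split_ifs <;> first | rfl | omega

-- A's result in the main case: the finished table of rectangle maxima
theorem top_left_max_main (matrix : List (List Int)) (rows cols : Int)
    (hr : 2 < rows) (hc : 2 < cols)
    (hlen : (rows - 2).toNat ≤ matrix.length)
    (hrow : ∀ r ∈ matrix.take (rows - 2).toNat, (cols - 2).toNat ≤ r.length) :
    top_left_max matrix rows cols
      = pvMkT rows.toNat cols.toNat
          (pvFin (pvM matrix) (rows - 2).toNat (cols - 2).toNat) := by
  have hrn : rows.toNat = (rows - 2).toNat + 2 := by omega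
  have hcn : cols.toNat = (cols - 2).toNat + 2 := by omega
  have hro : PySem.List.pyRange 1 (rows - 1) 1
      = (List.range (rows - 2).toNat).map (fun kn : Nat => 1 + (kn : Int)) := by
    have e : (rows - 1 - 1).toNat = (rows - 2).toNat := by omega
    rw [PySem.List.pyRange_one, e]
  have hco : PySem.List.pyRange 1 (cols - 1) 1
      = (List.range (cols - 2).toNat).map (fun ln : Nat => 1 + (ln : Int)) := by
    have e : (cols - 1 - 1).toNat = (cols - 2).toNat := by omega
    rw [PySem.List.pyRange_one, e]
  have hinit : (PySem.List.pyRange 0 rows 1).map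
        (fun _ => (PySem.List.pyRange 0 cols 1).map (fun _ => (0 : Int)))
      = pvMkT rows.toNat cols.toNat (fun _ _ => 0) := by
    rw [PySem.List.pyRange_one, PySem.List.pyRange_one]
    simp [pvMkT, Function.comp_def]
  rw [top_left_max_eq, hro, hco, hinit, List.foldl_map]
  simp only [List.foldl_map]
  rw [pvOuterA matrix (rows - 2).toNat (cols - 2).toNat rows.toNat cols.toNat
      hlen hrow hrn hcn (rows - 2).toNat le_rfl]
  rw [Option.getD_some]
  apply pvMkT_congr
  intro i _ j _
  unfold pvF pvFin
  split_ifs <;> first | rfl | omega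


-- named bodies of B's loops
def pvStepB1i (mrow : List Int) (st2 : Option (Int × List Int)) (b : Int) :
    Option (Int × List Int) :=
  st2.bind (fun p =>
    (PySem.List.pyGet? mrow b).map (fun v =>
      let run := if v > p.1 then v else p.1
      (run, p.2 ++ [run])))

def pvStepB1 (matrix : List (List Int)) (w : Int) (st : Option (List (List Int))) (a : Int) :
    Option (List (List Int)) :=
  st.bind (fun rm =>
    (PySem.List.pyGet? matrix a).bind (fun mrow =>
      (PySem.List.pyGet? mrow 0).bind (fun r0 =>
        ((PySem.List.pyRange 0 w 1).foldl (fun st2 b => pvStepB1i mrow st2 b)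
          (some ((r0 : Int), ([] : List Int)))).map (fun p => rm ++ [p.2]))))

def pvStepB2 (st : List Int × List (List Int)) (r : List Int) : List Int × List (List Int) :=
  let col := (st.1.zip r).map (fun cv => if cv.1 > cv.2 then cv.1 else cv.2)
  (col, st.2 ++ [col])

theorem top_left_max_alt_eq (matrix : List (List Int)) (rows cols : Int) :
    top_left_max_alt matrix rows cols =
      (if rows - 2 ≤ 0 ∨ cols - 2 ≤ 0 then
        (PySem.List.pyRange 0 rows 1).map
          (fun _ => (PySem.List.pyRange 0 cols 1).map (fun _ => (0 : Int)))
      else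
        match (PySem.List.pyRange 0 (rows - 2) 1).foldl
            (fun st a => pvStepB1 matrix (cols - 2) st a) (some []) with
        | none => []
        | some rm =>
          let step := rm.foldl pvStepB2
            ((PySem.List.pyRange 0 (cols - 2) 1).map (fun _ => (0 : Int)), [])
          let zero : List Int := (PySem.List.pyRange 0 cols 1).map (fun _ => (0 : Int))
          [zero] ++ step.2.map (fun r => [(0 : Int)] ++ r ++ [0]) ++ [zero]) := rfl

theorem pvIfMax (x y : Int) : (if x > y then x else y) = max x y := by
  by_cases hc : x ≤ y
  · rw [if_neg (not_lt.mpr hc), max_eq_right hc]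
  · rw [if_pos (lt_of_not_ge hc), max_eq_left (le_of_not_ge hc)]

theorem pvInnerB (matrix : List (List Int)) (a w : Nat)
    (ha : a < matrix.length) (hw : w ≤ matrix[a].length) :
    ∀ l, l ≤ w →
      List.foldl (fun st2 (bn : Nat) => pvStepB1i matrix[a] st2 (bn : Int))
          (some (pvRowM (pvM matrix) a 0, ([] : List Int))) (List.range l)
        = some (pvRowM (pvM matrix) a (l - 1),
            (List.range l).map (pvRowM (pvM matrix) a)) := by
  intro l
  induction l with
  | zero => intro _; rfl
  | succ l ih =>
      intro hl
      rw [List.range_succ, List.foldl_append, ih (by omega), List.foldl_cons, List.foldl_nil]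
      have hl' : l < matrix[a].length := lt_of_lt_of_le hl hw
      have hv : PySem.List.pyGet? matrix[a] (l : Int) = some matrix[a][l] := by
        rw [PySem.List.pyGet?_natCast, List.getElem?_eq_getElem hl']
      have hm : matrix[a][l] = pvM matrix a l := by
        simp [pvM, List.getD, ha, hl']
      unfold pvStepB1i
      rw [Option.bind_some, hv, Option.map_some]
      have hrun : (if pvM matrix a l > pvRowM (pvM matrix) a (l - 1) then pvM matrix a l
          else pvRowM (pvM matrix) a (l - 1)) = pvRowM (pvM matrix) a l := by
        cases l with
        | zero =>
            have e0 : pvRowM (pvM matrix) a (0 - 1) = pvM matrix a 0 := rfl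
            rw [e0, if_neg (lt_irrefl _)]
        | succ l' =>
            simp only [Nat.add_sub_cancel]
            rfl
      simp only [hm, hrun]
      simp

theorem pvPass1 (matrix : List (List Int)) (h w : Nat)
    (hlen : h ≤ matrix.length) (hrow : ∀ r ∈ matrix.take h, w ≤ r.length) (hw0 : 0 < w) :
    ∀ k, k ≤ h →
      List.foldl (fun st (an : Nat) => pvStepB1 matrix (w : Int) st (an : Int))
          (some ([] : List (List Int))) (List.range k)
        = some ((List.range k).map (fun a => (List.range w).map (pvRowM (pvM matrix) a))) := by
  intro k
  induction k with
  | zero => intro _; rfl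
  | succ k ih =>
      intro hk
      rw [List.range_succ, List.foldl_append, ih (by omega), List.foldl_cons, List.foldl_nil]
      have hk' : k < matrix.length := lt_of_lt_of_le hk hlen
      have hmw : w ≤ matrix[k].length := by
        refine hrow _ ?_
        have : (matrix.take h)[k]'(by simp [List.length_take]; omega) = matrix[k] :=
          List.getElem_take
        exact this ▸ List.getElem_mem _
      have hget : PySem.List.pyGet? matrix (k : Int) = some matrix[k] := by
        rw [PySem.List.pyGet?_natCast, List.getElem?_eq_getElem hk']
      have hget0 : PySem.List.pyGet? matrix[k] (0 : Int) = some matrix[k][0] := by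
        rw [show (0 : Int) = ((0 : Nat) : Int) from rfl, PySem.List.pyGet?_natCast,
          List.getElem?_eq_getElem (lt_of_lt_of_le hw0 hmw)]
      have hr0 : matrix[k][0] = pvRowM (pvM matrix) k 0 := by
        simp [pvRowM, pvM, List.getD, hk', lt_of_lt_of_le hw0 hmw]
      unfold pvStepB1
      rw [Option.bind_some, hget, Option.bind_some, hget0, Option.bind_some]
      have hrange : PySem.List.pyRange 0 (w : Int) 1
          = (List.range w).map (fun bn : Nat => (bn : Int)) := by
        rw [PySem.List.pyRange_one]
        simp
      rw [hrange, List.foldl_map, hr0, pvInnerB matrix k w hk' hmw w le_rfl, Option.map_some]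
      simp

theorem pvPass2 (m : Nat → Nat → Int) (w : Nat) :
    ∀ k,
      List.foldl pvStepB2 ((List.range w).map (fun _ => (0 : Int)), ([] : List (List Int)))
          ((List.range k).map (fun a => (List.range w).map (pvRowM m a)))
        = ((List.range w).map (fun b => pvR m k (b + 1)),
            (List.range k).map (fun a => (List.range w).map (fun b => pvR m (a + 1) (b + 1)))) := by
  intro k
  induction k with
  | zero => rfl
  | succ k ih =>
      rw [List.range_succ, List.map_append, List.foldl_append, ih, List.map_cons, List.map_nil,
        List.foldl_cons, List.foldl_nil]
      have hcol : (((List.range w).map (fun b => pvR m k (b + 1))).zip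
            ((List.range w).map (pvRowM m k))).map (fun cv => if cv.1 > cv.2 then cv.1 else cv.2)
          = (List.range w).map (fun b => pvR m (k + 1) (b + 1)) := by
        rw [List.zip_map', List.map_map]
        refine List.map_congr_left (fun b _ => ?_)
        simp only [Function.comp_apply]
        rw [pvIfMax, pvR_succ_left]
      unfold pvStepB2
      simp only [hcol]
      simp

theorem pvMapRangeSplit {α : Type} (g : Nat → α) (n : Nat) :
    (List.range (n + 2)).map g
      = [g 0] ++ ((List.range n).map (fun k => g (k + 1))) ++ [g (n + 1)] := by
  rw [List.range_succ_eq_map, List.range_succ]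
  simp [Function.comp_def]

theorem pvAssemble (m : Nat → Nat → Int) (h w : Nat) :
    pvMkT (h + 2) (w + 2) (pvFin m h w)
      = [(List.range (w + 2)).map (fun _ => (0 : Int))]
        ++ (List.range h).map (fun a =>
            [(0 : Int)] ++ (List.range w).map (fun b => pvR m (a + 1) (b + 1)) ++ [0])
        ++ [(List.range (w + 2)).map (fun _ => (0 : Int))] := by
  have hcols : ∀ i : Nat, 1 ≤ i → i ≤ h →
      (List.range (w + 2)).map (pvFin m h w i)
        = [(0 : Int)] ++ (List.range w).map (fun b => pvR m i (b + 1)) ++ [0] := by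
    intro i hi1 hi2
    rw [pvMapRangeSplit (pvFin m h w i) w]
    have h1 : pvFin m h w i 0 = 0 := by unfold pvFin; rw [if_neg (by omega)]
    have h2 : pvFin m h w i (w + 1) = 0 := by unfold pvFin; rw [if_neg (by omega)]
    have h3 : (List.range w).map (fun k => pvFin m h w i (k + 1))
        = (List.range w).map (fun b => pvR m i (b + 1)) := by
      refine List.map_congr_left (fun b hb => ?_)
      have hb' : b < w := List.mem_range.mp hb
      unfold pvFin
      rw [if_pos (by omega)]
    rw [h1, h2, h3]
  have hz0 : (List.range (w + 2)).map (pvFin m h w 0)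
      = (List.range (w + 2)).map (fun _ => (0 : Int)) :=
    List.map_congr_left (fun j _ => by unfold pvFin; rw [if_neg (by omega)])
  have hzl : (List.range (w + 2)).map (pvFin m h w (h + 1))
      = (List.range (w + 2)).map (fun _ => (0 : Int)) :=
    List.map_congr_left (fun j _ => by unfold pvFin; rw [if_neg (by omega)])
  have hmid : (List.range h).map (fun k => (List.range (w + 2)).map (pvFin m h w (k + 1)))
      = (List.range h).map (fun a =>
          [(0 : Int)] ++ (List.range w).map (fun b => pvR m (a + 1) (b + 1)) ++ [0]) :=
    List.map_congr_left (fun a ha => hcols (a + 1) (by omega) (by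
      have := List.mem_range.mp ha; omega))
  unfold pvMkT
  rw [pvMapRangeSplit (fun i => (List.range (w + 2)).map (pvFin m h w i)) h]
  rw [hz0, hzl, hmid]

theorem top_left_max_alt_main (matrix : List (List Int)) (rows cols : Int)
    (hr : 2 < rows) (hc : 2 < cols)
    (hlen : (rows - 2).toNat ≤ matrix.length)
    (hrow : ∀ r ∈ matrix.take (rows - 2).toNat, (cols - 2).toNat ≤ r.length) :
    top_left_max_alt matrix rows cols
      = pvMkT rows.toNat cols.toNat
          (pvFin (pvM matrix) (rows - 2).toNat (cols - 2).toNat) := by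
  have hh : (rows - 2) = (((rows - 2).toNat : Nat) : Int) := by omega
  have hw : (cols - 2) = (((cols - 2).toNat : Nat) : Int) := by omega
  have hw0 : 0 < (cols - 2).toNat := by omega
  have hrn : rows.toNat = (rows - 2).toNat + 2 := by omega
  have hcn : cols.toNat = (cols - 2).toNat + 2 := by omega
  rw [top_left_max_alt_eq, if_neg (by omega)]
  have hrange1 : PySem.List.pyRange 0 (rows - 2) 1
      = (List.range (rows - 2).toNat).map (fun an : Nat => (an : Int)) := by
    rw [hh, PySem.List.pyRange_one]
    simp
  have hrange2 : (PySem.List.pyRange 0 (cols - 2) 1).map (fun _ => (0 : Int))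
      = (List.range (cols - 2).toNat).map (fun _ => (0 : Int)) := by
    rw [hw, PySem.List.pyRange_one]
    simp [List.map_map, Function.comp_def]
  rw [hrange1, List.foldl_map]
  rw [show (fun st (an : Nat) => pvStepB1 matrix (cols - 2) st (an : Int))
      = (fun st (an : Nat) => pvStepB1 matrix (((cols - 2).toNat : Nat) : Int) st (an : Int)) by
    rw [← hw]]
  rw [pvPass1 matrix (rows - 2).toNat (cols - 2).toNat hlen hrow hw0 (rows - 2).toNat le_rfl]
  simp only [hrange2]
  rw [pvPass2 (pvM matrix) (cols - 2).toNat (rows - 2).toNat]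
  -- assemble the bordered table
  have hzero : (PySem.List.pyRange 0 cols 1).map (fun _ => (0 : Int))
      = (List.range cols.toNat).map (fun _ => (0 : Int)) := by
    rw [PySem.List.pyRange_one]
    simp [List.map_map, Function.comp_def]
  rw [hzero, hrn, hcn, pvAssemble (pvM matrix) (rows - 2).toNat (cols - 2).toNat]
  simp [List.map_map, Function.comp_def]

-- ===== VERDICT (by name: the statement is the Claim_ definition above) =====
theorem pvFoldlConst {α β : Type} (L : List β) (s : α) :
    L.foldl (fun st _ => st) s = s := by
  induction L generalizing s with
  | nil => rfl
  | cons x xs ih => exact ih s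

theorem top_left_max_spec : Claim_equal_top_left_max := by
  intro matrix rows cols _ hpre
  unfold Spec_top_left_max
  by_cases hr : rows ≤ 2
  · rw [top_left_max_eq, top_left_max_alt_eq, if_pos (Or.inl (by omega))]
    have hout : PySem.List.pyRange 1 (rows - 1) 1 = [] := by
      rw [PySem.List.pyRange_one, show (rows - 1 - 1).toNat = 0 by omega]
      rfl
    rw [hout, List.foldl_nil, Option.getD_some]
  · by_cases hc : cols ≤ 2
    · rw [top_left_max_eq, top_left_max_alt_eq, if_pos (Or.inr (by omega))]
      have hin : PySem.List.pyRange 1 (cols - 1) 1 = [] := by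
        rw [PySem.List.pyRange_one, show (cols - 1 - 1).toNat = 0 by omega]
        rfl
      rw [hin]
      simp only [List.foldl_nil]
      rw [pvFoldlConst, Option.getD_some]
    · have hlenrow : (rows - 2).toNat ≤ matrix.length ∧
          ∀ r ∈ matrix.take (rows - 2).toNat, (cols - 2).toNat ≤ r.length := by
        rcases hpre with h1 | h2 | h3
        · omega
        · omega
        · exact h3
      rw [top_left_max_main matrix rows cols (by omega) (by omega) hlenrow.1 hlenrow.2,
        top_left_max_alt_main matrix rows cols (by omega) (by omega) hlenrow.1 hlenrow.2]
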